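-- pv_equiv track=rewrite | github.com/zeomzzz/python-algorithm-study | BOJ/Silver/15664.py | solution
-- ===== SOURCE A (Python) =====
-- def solution(N, M, Arr) :
--     ans = []
--     arr = sorted(Arr)
--
--     if M == 1 :
--         for i in arr :
--             if len(ans) == 0 :
--                 ans.append([i])
--             else :
--                 if ans[-1] != [i] :
--                     ans.append([i])
--     else :
--         for i in solution(N, M-1, Arr) :
--
--             # 새로운 것만 추가하기 위해서 기존 리스트에 있는 것은 제외한 리스트 만듦
--             tmp_arr = arr[:]
--             for j in i :
--                 tmp_arr.remove(j)
--
--             # 새로운 것을 추가하여 답 리스트에 추가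
--             # 비내림차순이므로 답 리스트 마지막 수보다 새로운 수가 크거가 같은 경우에만 추가
--             # 그런데 이전에 추가한 것과 동일하지 않은 경우에만 추가
--             for k in tmp_arr :
--                 tmp_i = i[:]
--                 if len(tmp_i) > 0 and tmp_i[-1] <= k :
--                     tmp_i.append(k)
--
--                     if len(ans) == 0 :
--                         ans.append(tmp_i)
--                     else :
--                         if tmp_i != ans[-1] :
--                             ans.append(tmp_i)
--
--     return ans
-- ===== SOURCE B (Python) =====
-- def solution(N, M, Arr):
--     def combos(xs, m):
--         # xs sorted; all unique non-decreasing length-m selections, lex order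
--         if m == 0:
--             return [[]]
--         if not xs:
--             return []
--         v = xs[0]
--         with_v = [[v] + t for t in combos(xs[1:], m - 1)]
--         i = 1
--         while i < len(xs) and xs[i] == v:   # skip equal values at this depth
--             i += 1
--         return with_v + combos(xs[i:], m)
--     return combos(sorted(Arr), M)
-- ===== Notes on version B (the rewrite author's own statement) =====
-- stated objective: alternative
-- what changed: Replaces A's level-by-level rebuild (which re-derives each candidate's remaining pool with repeated list.remove and deduplicates via adjacent comparison) by a direct DFS backtracking recursion on the sorted array that skips equal values at the same depth, so no remove passes and no dedup pass are needed.
import Mathlib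
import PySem

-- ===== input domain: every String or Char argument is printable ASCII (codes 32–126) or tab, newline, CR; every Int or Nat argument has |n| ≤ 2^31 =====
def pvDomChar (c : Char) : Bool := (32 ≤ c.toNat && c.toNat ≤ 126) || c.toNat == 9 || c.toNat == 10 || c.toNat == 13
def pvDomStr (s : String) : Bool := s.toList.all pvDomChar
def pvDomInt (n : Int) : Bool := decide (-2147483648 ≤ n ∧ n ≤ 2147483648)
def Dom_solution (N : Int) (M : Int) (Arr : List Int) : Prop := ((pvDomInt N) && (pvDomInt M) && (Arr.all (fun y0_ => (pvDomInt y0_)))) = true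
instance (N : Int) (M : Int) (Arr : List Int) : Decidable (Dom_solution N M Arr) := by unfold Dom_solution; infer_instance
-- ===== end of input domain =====

-- B replaces A's level-by-level rebuild (repeated list.remove + adjacent dedup) by a DFS
-- backtracking recursion on the sorted array that skips equal values at the same depth.

-- ===== PORT A =====
-- 'if len(ans)==0: ans.append(x)  else: if ans[-1] != x: ans.append(x)'
def pushA (ans : List (List Int)) (x : List Int) : List (List Int) :=
  if ans = [] then ans ++ [x]
  else if ans.getLast? ≠ some x then ans ++ [x] else ans

-- solLevel arr n = A's result for M = n+1 on the pre-sorted arr (A re-sorts Arr at each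
-- recursion level, which yields the same sorted list each time).
def solLevel (arr : List Int) : Nat → List (List Int)
  | 0 => arr.foldl (fun ans i => pushA ans [i]) []
  | n+1 =>
    (solLevel arr n).foldl (fun ans i =>
      -- tmp_arr = arr[:]; for j in i: tmp_arr.remove(j)   (remove never fails here: i is
      -- drawn from arr; the .getD fallback is unreachable)
      let tmp_arr := i.foldl (fun t j => (PySem.List.remove? t j).getD t) arr
      tmp_arr.foldl (fun ans k =>
        -- tmp_i = i[:]; if len(tmp_i) > 0 and tmp_i[-1] <= k: tmp_i.append(k); push
        if 0 < i.length ∧ i.getLast?.getD 0 ≤ k then pushA ans (i ++ [k]) else ans) ans) []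

def solution (N : Int) (M : Int) (Arr : List Int) : List (List Int) :=
  -- for M ≤ 0 the Python recurses forever (Pre_ excludes it); the guard only totalizes
  if 1 ≤ M then solLevel (PySem.List.sorted Arr (fun x => x) false) (M - 1).toNat else []

-- ===== PORT B =====
-- combosF fuel xs m: all distinct non-decreasing length-m selections from sorted xs, in
-- lex order.  Source B recurses on the (strictly shrinking) list xs; the extra 'fuel'
-- parameter (instantiated with xs.length below) only makes that recursion structural.
def combosF : Nat → List Int → Int → List (List Int)
  | _, _, 0 => [[]]
  | _, [], _ => []
  | 0, _ :: _, _ => []   -- unreachable: fuel ≥ length of the list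
  | f+1, v :: rest, m =>
    ((combosF f rest (m - 1)).map (fun t => v :: t))
      ++ combosF f (rest.dropWhile (fun x => x = v)) m   -- skip equal values at this depth

def combos (xs : List Int) (m : Int) : List (List Int) := combosF xs.length xs m

def solution_alt (N : Int) (M : Int) (Arr : List Int) : List (List Int) :=
  combos (PySem.List.sorted Arr (fun x => x) false) M

-- ===== PRECONDITION & SPEC =====
-- Pre_ excludes M ≤ 0, where A's recursion never reaches its base case (RecursionError).
def Pre_solution (N : Int) (M : Int) (Arr : List Int) : Prop := 1 ≤ M
instance (N : Int) (M : Int) (Arr : List Int) : Decidable (Pre_solution N M Arr) := by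
  unfold Pre_solution; infer_instance

def pvWitness_solution : Int × Int × List Int := (4, 2, [1, 2, 1, 3])

def Spec_solution (N : Int) (M : Int) (Arr : List Int) (out : List (List Int)) : Prop :=
  out = solution_alt N M Arr
instance (N : Int) (M : Int) (Arr : List Int) (out : List (List Int)) :
    Decidable (Spec_solution N M Arr out) := by unfold Spec_solution; infer_instance

-- ===== CLAIM (what is proved, stated in full; the proofs are below) =====
def Claim_equal_solution : Prop := ∀ (N : Int) (M : Int) (Arr : List Int),
  Dom_solution N M Arr → Pre_solution N M Arr → Spec_solution N M Arr (solution N M Arr)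

-- ===== LEMMAS AND PROOFS =====

-- Strict and non-strict lexicographic order on List Int
def LexLt (a b : List Int) : Prop := List.Lex (· < ·) a b
def LexLe (a b : List Int) : Prop := LexLt a b ∨ a = b

theorem lexLt_iff_lt {a b : List Int} : LexLt a b ↔ a < b := by
  unfold LexLt; rw [← List.lt_iff_lex_lt]; rfl

theorem lexLt_irrefl (a : List Int) : ¬ LexLt a a := by
  rw [lexLt_iff_lt]; exact lt_irrefl a

theorem lexLt_asymm {a b : List Int} : LexLt a b → ¬ LexLt b a := by
  rw [lexLt_iff_lt, lexLt_iff_lt]; exact lt_asymm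

theorem lexLt_append : ∀ {a b : List Int}, LexLt a b → a.length = b.length →
    ∀ x y : List Int, LexLt (a ++ x) (b ++ y) := by
  intro a b h
  unfold LexLt at *
  induction h with
  | nil => intro hl; simp at hl
  | rel h => intro _ x y; exact List.Lex.rel h
  | cons h ih => intro hl x y; exact List.Lex.cons (ih (by simpa using hl) x y)

theorem lexLt_append_right {k1 k2 : Int} (h : k1 < k2) :
    ∀ a : List Int, LexLt (a ++ [k1]) (a ++ [k2]) := by
  intro a; induction a with
  | nil => exact List.Lex.rel h
  | cons x xs ih => exact List.Lex.cons ih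

-- unique sorted representation: two strictly lex-sorted lists with the same members agree
theorem sorted_lex_eq_of_mem_iff : ∀ (l1 l2 : List (List Int)),
    l1.Pairwise LexLt → l2.Pairwise LexLt → (∀ c, c ∈ l1 ↔ c ∈ l2) → l1 = l2 := by
  intro l1
  induction l1 with
  | nil =>
    intro l2 _ _ hm
    cases l2 with
    | nil => rfl
    | cons h2 t2 => exact absurd ((hm h2).2 List.mem_cons_self) (List.not_mem_nil)
  | cons h1 t1 ih =>
    intro l2 hp1 hp2 hm
    cases l2 with
    | nil => exact absurd ((hm h1).1 List.mem_cons_self) (List.not_mem_nil)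
    | cons h2 t2 =>
      have hh : h1 = h2 := by
        rcases List.mem_cons.1 ((hm h1).1 List.mem_cons_self) with h | h
        · exact h
        · rcases List.mem_cons.1 ((hm h2).2 List.mem_cons_self) with h' | h'
          · exact h'.symm
          · exact absurd ((List.pairwise_cons.1 hp2).1 h1 h)
              (lexLt_asymm ((List.pairwise_cons.1 hp1).1 h2 h'))
      subst hh
      have hmt : ∀ c, c ∈ t1 ↔ c ∈ t2 := by
        intro c
        constructor
        · intro hc
          rcases List.mem_cons.1 ((hm c).1 (List.mem_cons_of_mem _ hc)) with h | h
          · exact absurd ((List.pairwise_cons.1 hp1).1 c hc)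
              (h ▸ lexLt_irrefl h1)
          · exact h
        · intro hc
          rcases List.mem_cons.1 ((hm c).2 (List.mem_cons_of_mem _ hc)) with h | h
          · exact absurd ((List.pairwise_cons.1 hp2).1 c hc)
              (h ▸ lexLt_irrefl h1)
          · exact h
      rw [ih t2 (List.pairwise_cons.1 hp1).2 (List.pairwise_cons.1 hp2).2 hmt]

-- the membership characterisation of the output lists
def OutChar (xs : List Int) (m : Int) (c : List Int) : Prop :=
  c.Pairwise (· ≤ ·) ∧ c.Subperm xs ∧ (c.length : Int) = m

theorem outChar_zero (xs c : List Int) : OutChar xs 0 c ↔ c = [] := by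
  unfold OutChar
  constructor
  · rintro ⟨_, _, h⟩; exact List.length_eq_zero_iff.1 (by omega)
  · rintro rfl; exact ⟨List.Pairwise.nil, List.nil_subperm, rfl⟩

theorem outChar_nil {m : Int} (hm : m ≠ 0) (c : List Int) : ¬ OutChar [] m c := by
  rintro ⟨_, h2, h3⟩
  rw [List.subperm_nil] at h2
  subst h2; simp at h3; omega

-- subperm into v :: rest, avoiding the value v, iff subperm into the tail with the
-- leading run of v's dropped
theorem subperm_dropWhile_iff {v : Int} {rest c : List Int} (hv : v ∉ c) :
    c.Subperm (v :: rest) ↔ c.Subperm (rest.dropWhile (fun x => x = v)) := by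
  constructor
  · intro h
    rw [List.subperm_ext_iff] at h ⊢
    intro x hx
    have hxv : x ≠ v := fun he => hv (he ▸ hx)
    have hrest : rest.count x =
        (rest.takeWhile (fun y => y = v)).count x + (rest.dropWhile (fun y => y = v)).count x := by
      conv_lhs => rw [← List.takeWhile_append_dropWhile (p := fun y => y = v) (l := rest)]
      exact List.count_append ..
    have htw : (rest.takeWhile (fun y => y = v)).count x = 0 := by
      rw [List.count_eq_zero]
      intro hmem
      exact hxv (by simpa using List.mem_takeWhile_imp hmem)
    have := h x hx
    have hvx : v ≠ x := Ne.symm hxv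
    simp [hvx] at this
    omega
  · intro h
    exact h.trans ((List.dropWhile_sublist _).subperm.trans (List.sublist_cons_self v rest).subperm)

-- in a sorted list v :: rest, everything after the leading run of v's is > v
theorem dropWhile_gt {v : Int} : ∀ {rest : List Int}, rest.Pairwise (· ≤ ·) →
    (∀ y ∈ rest, v ≤ y) → ∀ w ∈ rest.dropWhile (fun x => x = v), v < w := by
  intro rest
  induction rest with
  | nil => intro _ _ w hw; simp at hw
  | cons r rs ih =>
    intro hp hge w hw
    obtain ⟨hr, hrs⟩ := List.pairwise_cons.1 hp
    by_cases hrv : r = v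
    · rw [List.dropWhile_cons_of_pos (by simp [hrv])] at hw
      exact ih hrs (fun y hy => hge y (List.mem_cons_of_mem _ hy)) w hw
    · rw [List.dropWhile_cons_of_neg (by simp [hrv])] at hw
      have hvr : v < r := lt_of_le_of_ne (hge r List.mem_cons_self) (Ne.symm hrv)
      rcases List.mem_cons.1 hw with rfl | hw
      · exact hvr
      · exact lt_of_lt_of_le hvr (hr w hw)

theorem combosF_zero (f : Nat) (xs : List Int) : combosF f xs 0 = [[]] := by
  rcases f with _ | f <;> rcases xs with _ | ⟨v, rest⟩ <;> rfl

theorem combosF_nil (f : Nat) {m : Int} (hm : m ≠ 0) : combosF f [] m = [] := by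
  rcases m with a | a
  · rcases a with _ | a
    · exact absurd rfl hm
    · rcases f with _ | f <;> rfl
  · rcases f with _ | f <;> rfl

theorem combosF_cons (f : Nat) (v : Int) (rest : List Int) {m : Int} (hm : m ≠ 0) :
    combosF (f+1) (v :: rest) m =
      ((combosF f rest (m - 1)).map (fun t => v :: t))
        ++ combosF f (rest.dropWhile (fun x => x = v)) m := by
  rcases m with a | a
  · rcases a with _ | a
    · exact absurd rfl hm
    · rfl
  · rfl

theorem combosF_mem : ∀ (f : Nat) (xs : List Int), xs.length ≤ f → xs.Pairwise (· ≤ ·) →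
    ∀ (m : Int) (c : List Int), (c ∈ combosF f xs m ↔ OutChar xs m c) := by
  intro f
  induction f with
  | zero =>
    intro xs hlen _ m c
    have hxs : xs = [] := List.length_eq_zero_iff.1 (by omega)
    subst hxs
    by_cases hm : m = 0
    · subst hm; simp [combosF_zero, outChar_zero]
    · rw [combosF_nil 0 hm]
      simp [outChar_nil hm c]
  | succ f ih =>
    intro xs hlen hs m c
    by_cases hm : m = 0
    · subst hm
      simp [combosF_zero, outChar_zero]
    · rcases xs with _ | ⟨v, rest⟩
      · rw [combosF_nil _ hm]
        simp [outChar_nil hm c]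
      · obtain ⟨hge, hrest⟩ := List.pairwise_cons.1 hs
        rw [combosF_cons f v rest hm, List.mem_append, List.mem_map]
        have hlr : rest.length ≤ f := by simp at hlen; omega
        have hld : (rest.dropWhile (fun x => x = v)).length ≤ f :=
          le_trans (List.length_dropWhile_le _ _) hlr
        have hsd : (rest.dropWhile (fun x => x = v)).Pairwise (· ≤ ·) :=
          hrest.sublist (List.dropWhile_sublist _)
        constructor
        · rintro (⟨t, ht, rfl⟩ | hc)
          · obtain ⟨h1, h2, h3⟩ := (ih rest hlr hrest (m-1) t).1 ht
            refine ⟨List.pairwise_cons.2 ⟨fun y hy => hge y (h2.subset hy), h1⟩,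
              (List.subperm_cons v).2 h2, by simp; omega⟩
          · obtain ⟨h1, h2, h3⟩ := (ih _ hld hsd m c).1 hc
            exact ⟨h1, h2.trans ((List.dropWhile_sublist _).subperm.trans
              (List.sublist_cons_self v rest).subperm), h3⟩
        · rintro ⟨h1, h2, h3⟩
          by_cases hvc : v ∈ c
          · left
            rcases c with _ | ⟨h0, t⟩
            · simp at hvc
            · have hh : h0 = v := by
                have h0mem : h0 ∈ v :: rest := h2.subset List.mem_cons_self
                have hle : v ≤ h0 := by
                  rcases List.mem_cons.1 h0mem with rfl | hmm
                  · exact le_refl _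
                  · exact hge h0 hmm
                have hge0 : h0 ≤ v := by
                  rcases List.mem_cons.1 hvc with heq | hmem
                  · exact le_of_eq heq.symm
                  · exact (List.pairwise_cons.1 h1).1 v hmem
                exact le_antisymm hge0 hle
              subst hh
              refine ⟨t, (ih rest hlr hrest (m-1) t).2
                ⟨(List.pairwise_cons.1 h1).2, (List.subperm_cons h0).1 h2, ?_⟩, rfl⟩
              simp at h3; omega
          · right
            exact (ih _ hld hsd m c).2 ⟨h1, (subperm_dropWhile_iff hvc).1 h2, h3⟩

theorem combosF_pairwise : ∀ (f : Nat) (xs : List Int), xs.length ≤ f → xs.Pairwise (· ≤ ·) →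
    ∀ (m : Int), (combosF f xs m).Pairwise LexLt := by
  intro f
  induction f with
  | zero =>
    intro xs hlen _ m
    have hxs : xs = [] := List.length_eq_zero_iff.1 (by omega)
    subst hxs
    by_cases hm : m = 0
    · subst hm; rw [combosF_zero]; simp
    · rw [combosF_nil 0 hm]; simp
  | succ f ih =>
    intro xs hlen hs m
    by_cases hm : m = 0
    · subst hm; rw [combosF_zero]; simp
    · rcases xs with _ | ⟨v, rest⟩
      · rw [combosF_nil _ hm]; simp
      · obtain ⟨hge, hrest⟩ := List.pairwise_cons.1 hs
        rw [combosF_cons f v rest hm]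
        have hlr : rest.length ≤ f := by simp at hlen; omega
        have hld : (rest.dropWhile (fun x => x = v)).length ≤ f :=
          le_trans (List.length_dropWhile_le _ _) hlr
        have hsd : (rest.dropWhile (fun x => x = v)).Pairwise (· ≤ ·) :=
          hrest.sublist (List.dropWhile_sublist _)
        rw [List.pairwise_append]
        refine ⟨?_, ih _ hld hsd m, ?_⟩
        · rw [List.pairwise_map]
          exact (ih rest hlr hrest (m-1)).imp (fun h => List.Lex.cons h)
        · rintro a ha b hb
          obtain ⟨t, _, rfl⟩ := List.mem_map.1 ha
          obtain ⟨hb1, hb2, hb3⟩ := (combosF_mem f _ hld hsd m b).1 hb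
          rcases b with _ | ⟨hb0, tb⟩
          · simp at hb3; omega
          · exact List.Lex.rel (dropWhile_gt hrest hge hb0 (hb2.subset List.mem_cons_self))

theorem combos_mem {xs : List Int} (hs : xs.Pairwise (· ≤ ·)) (m : Int) (c : List Int) :
    c ∈ combos xs m ↔ OutChar xs m c :=
  combosF_mem xs.length xs (le_refl _) hs m c

theorem combos_pairwise {xs : List Int} (hs : xs.Pairwise (· ≤ ·)) (m : Int) :
    (combos xs m).Pairwise LexLt :=
  combosF_pairwise xs.length xs (le_refl _) hs m

-- adjacent-dedup recursion equivalent to A's push-fold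
def dd (prev : Option (List Int)) : List (List Int) → List (List Int)
  | [] => []
  | x :: xs => if prev = some x then dd prev xs else x :: dd (some x) xs

theorem pushA_eq (acc : List (List Int)) (x : List Int) :
    pushA acc x = if acc.getLast? = some x then acc else acc ++ [x] := by
  unfold pushA
  rcases acc with _ | ⟨a, as⟩
  · simp
  · simp only [reduceCtorEq, if_false, ne_eq, ite_not]

theorem foldl_pushA (l : List (List Int)) : ∀ acc,
    l.foldl pushA acc = acc ++ dd acc.getLast? l := by
  induction l with
  | nil => intro acc; simp [dd]
  | cons x xs ih =>
    intro acc
    rw [List.foldl_cons, pushA_eq]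
    by_cases h : acc.getLast? = some x
    · rw [if_pos h, ih acc, h]; simp [dd]
    · rw [if_neg h, ih (acc ++ [x])]; simp [dd, h]

theorem dd_spec : ∀ (l : List (List Int)) (prev : Option (List Int)),
    l.Pairwise LexLe → (∀ p, prev = some p → ∀ c ∈ l, LexLe p c) →
    (dd prev l).Pairwise LexLt ∧ (∀ c, c ∈ dd prev l ↔ c ∈ l ∧ prev ≠ some c) := by
  intro l
  induction l with
  | nil => intro prev _ _; exact ⟨List.Pairwise.nil, by simp [dd]⟩
  | cons x xs ih =>
    intro prev hp hprev
    obtain ⟨hx, hxs⟩ := List.pairwise_cons.1 hp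
    by_cases h : prev = some x
    · subst h
      obtain ⟨pw, miff⟩ := ih (some x) hxs (fun p hp c hc => by
        cases Option.some.injEq .. ▸ hp
        exact hx c hc)
      rw [show dd (some x) (x :: xs) = dd (some x) xs by simp [dd]]
      refine ⟨pw, fun c => ?_⟩
      rw [miff c]
      constructor
      · rintro ⟨h1, h2⟩; exact ⟨List.mem_cons_of_mem _ h1, h2⟩
      · rintro ⟨h1, h2⟩
        rcases List.mem_cons.1 h1 with rfl | h1
        · exact absurd rfl h2
        · exact ⟨h1, h2⟩
    · obtain ⟨pw, miff⟩ := ih (some x) hxs (fun p hp c hc => by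
        cases Option.some.injEq .. ▸ hp
        exact hx c hc)
      rw [show dd prev (x :: xs) = x :: dd (some x) xs by simp [dd, h]]
      constructor
      · refine List.pairwise_cons.2 ⟨fun c hc => ?_, pw⟩
        obtain ⟨hc1, hc2⟩ := (miff c).1 hc
        rcases hx c hc1 with hlt | rfl
        · exact hlt
        · exact absurd rfl hc2
      · intro c
        constructor
        · intro hc
          rcases List.mem_cons.1 hc with rfl | hc
          · exact ⟨List.mem_cons_self, h⟩
          · obtain ⟨hc1, hc2⟩ := (miff c).1 hc
            refine ⟨List.mem_cons_of_mem _ hc1, fun he => ?_⟩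
            have h1 : LexLe c x := hprev c he x List.mem_cons_self
            have h2 : LexLt x c := by
              rcases hx c hc1 with hlt | heq
              · exact hlt
              · exact absurd (congrArg some heq) hc2
            rcases h1 with hlt | rfl
            · exact lexLt_asymm h2 hlt
            · exact lexLt_irrefl c h2
        · rintro ⟨h1, h2⟩
          rcases List.mem_cons.1 h1 with rfl | h1
          · exact List.mem_cons_self
          · by_cases hcx : c = x
            · subst hcx; exact List.mem_cons_self
            · exact List.mem_cons_of_mem _ ((miff c).2 ⟨h1, fun he => hcx (by
                injection he with he; exact he.symm)⟩)

-- ---- A-side machinery ----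

def tmpOf (arr : List Int) (i : List Int) : List Int :=
  i.foldl (fun t j => (PySem.List.remove? t j).getD t) arr

theorem tmpOf_spec : ∀ (i arr : List Int), i.Subperm arr → arr.Pairwise (· ≤ ·) →
    (tmpOf arr i).Pairwise (· ≤ ·) ∧
      ∀ x, (tmpOf arr i).count x = arr.count x - i.count x := by
  intro i
  induction i with
  | nil => intro arr _ hs; exact ⟨hs, fun x => by simp [tmpOf]⟩
  | cons j i' ih =>
    intro arr hsub hs
    have hj : j ∈ arr := hsub.subset List.mem_cons_self
    have hstep : tmpOf arr (j :: i') = tmpOf (arr.erase j) i' := by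
      unfold tmpOf
      rw [List.foldl_cons, PySem.List.remove?_eq_some_erase arr j hj, Option.getD_some]
    have hcnt := List.subperm_ext_iff.1 hsub
    have hsub' : i'.Subperm (arr.erase j) := by
      rw [List.subperm_ext_iff]
      intro x hx
      by_cases hxj : x = j
      · subst hxj
        have := hcnt x List.mem_cons_self
        rw [List.count_erase_self]
        simp at this ⊢
        omega
      · rw [List.count_erase_of_ne hxj]
        have := hcnt x (List.mem_cons_of_mem _ hx)
        simp [List.count_cons] at this
        omega
    obtain ⟨hp, hc⟩ := ih (arr.erase j) hsub' (hs.sublist (List.erase_sublist ..))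
    rw [hstep]
    refine ⟨hp, fun x => ?_⟩
    have hja := hcnt j List.mem_cons_self
    simp at hja
    by_cases hxj : x = j
    · subst hxj
      rw [hc x, List.count_erase_self]
      simp
      omega
    · have hjx : j ≠ x := fun he => hxj he.symm
      rw [hc x, List.count_erase_of_ne hxj]
      simp [hjx]

theorem le_getLast_of_pairwise : ∀ {i : List Int}, i.Pairwise (· ≤ ·) →
    ∀ x ∈ i, ∀ (h : i ≠ []), x ≤ i.getLast h := by
  intro i
  induction i with
  | nil => intro _ x hx; simp at hx
  | cons a as ihh =>
    intro hp x hx h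
    obtain ⟨ha, has⟩ := List.pairwise_cons.1 hp
    rcases as with _ | ⟨b, bs⟩
    · simp at hx; simp [hx]
    · rw [List.getLast_cons (by simp)]
      rcases List.mem_cons.1 hx with rfl | hx
      · exact ha _ (List.getLast_mem _)
      · exact ihh has x hx (by simp)

def blk (arr : List Int) (i : List Int) : List (List Int) :=
  ((tmpOf arr i).filter (fun k => decide (0 < i.length ∧ i.getLast?.getD 0 ≤ k))).map
    (fun k => i ++ [k])

theorem inner_foldl (i : List Int) : ∀ (tmp : List Int) (ans : List (List Int)),
    tmp.foldl (fun ans k =>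
        if 0 < i.length ∧ i.getLast?.getD 0 ≤ k then pushA ans (i ++ [k]) else ans) ans =
      ((tmp.filter (fun k => decide (0 < i.length ∧ i.getLast?.getD 0 ≤ k))).map
        (fun k => i ++ [k])).foldl pushA ans := by
  intro tmp
  induction tmp with
  | nil => intro ans; rfl
  | cons k tmp ih =>
    intro ans
    rw [List.foldl_cons]
    by_cases h : 0 < i.length ∧ i.getLast?.getD 0 ≤ k
    · rw [if_pos h, List.filter_cons_of_pos (by simpa using h), List.map_cons, List.foldl_cons,
        ih]
    · rw [if_neg h, List.filter_cons_of_neg (by simpa using h), ih]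

theorem outer_foldl (arr : List Int) : ∀ (L : List (List Int)) (ans : List (List Int)),
    L.foldl (fun ans i =>
        (tmpOf arr i).foldl (fun ans k =>
          if 0 < i.length ∧ i.getLast?.getD 0 ≤ k then pushA ans (i ++ [k]) else ans) ans) ans =
      (L.flatMap (blk arr)).foldl pushA ans := by
  intro L
  induction L with
  | nil => intro ans; rfl
  | cons i L ih =>
    intro ans
    rw [List.foldl_cons, List.flatMap_cons, List.foldl_append, inner_foldl, ih]
    rfl

theorem solLevel_succ (arr : List Int) (n : Nat) :
    solLevel arr (n+1) = dd none ((solLevel arr n).flatMap (blk arr)) := by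
  show (solLevel arr n).foldl _ [] = _
  rw [show (fun (ans : List (List Int)) (i : List Int) =>
      (i.foldl (fun t j => (PySem.List.remove? t j).getD t) arr).foldl (fun ans k =>
        if 0 < i.length ∧ i.getLast?.getD 0 ≤ k then pushA ans (i ++ [k]) else ans) ans) =
    (fun ans i => (tmpOf arr i).foldl (fun ans k =>
        if 0 < i.length ∧ i.getLast?.getD 0 ≤ k then pushA ans (i ++ [k]) else ans) ans) from rfl]
  rw [outer_foldl, foldl_pushA]
  rfl

-- generic gluing of pairwise facts over flatMap
theorem pairwise_flatMap {α β : Type} {S : α → α → Prop} {R : β → β → Prop}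
    {g : α → List β} : ∀ {L : List α}, L.Pairwise S → (∀ i ∈ L, (g i).Pairwise R) →
    (∀ i1 i2, S i1 i2 → i1 ∈ L → i2 ∈ L → ∀ a ∈ g i1, ∀ b ∈ g i2, R a b) →
    (L.flatMap g).Pairwise R := by
  intro L
  induction L with
  | nil => intro _ _ _; simp
  | cons i L ih =>
    intro hP hin hcross
    obtain ⟨hi, hL⟩ := List.pairwise_cons.1 hP
    rw [List.flatMap_cons, List.pairwise_append]
    refine ⟨hin i List.mem_cons_self, ih hL
      (fun j hj => hin j (List.mem_cons_of_mem _ hj))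
      (fun i1 i2 hS h1 h2 => hcross i1 i2 hS (List.mem_cons_of_mem _ h1)
        (List.mem_cons_of_mem _ h2)), ?_⟩
    intro a ha b hb
    obtain ⟨i2, hi2, hbi2⟩ := List.mem_flatMap.1 hb
    exact hcross i i2 (hi i2 hi2) List.mem_cons_self (List.mem_cons_of_mem _ hi2) a ha b hbi2

theorem step_eq {arr : List Int} (hs : arr.Pairwise (· ≤ ·)) {m : Int} (hm : 1 ≤ m) :
    dd none ((combos arr m).flatMap (blk arr)) = combos arr (m+1) := by
  have hmem : ∀ c, c ∈ (combos arr m).flatMap (blk arr) ↔ OutChar arr (m+1) c := by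
    intro c
    rw [List.mem_flatMap]
    constructor
    · rintro ⟨i, hi, hc⟩
      obtain ⟨h1, h2, h3⟩ := (combos_mem hs m i).1 hi
      obtain ⟨kk, hkmemf, rfl⟩ := List.mem_map.1 hc
      obtain ⟨hktmp, hgate⟩ := List.mem_filter.1 hkmemf
      have hgate' : 0 < i.length ∧ i.getLast?.getD 0 ≤ kk := by simpa using hgate
      have hne : i ≠ [] := by intro he; subst he; simp at hgate'
      have hlast : i.getLast?.getD 0 = i.getLast hne := by
        rw [List.getLast?_eq_some_getLast hne]; rfl
      obtain ⟨hts, htc⟩ := tmpOf_spec i arr h2 hs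
      have hkcnt : 0 < (tmpOf arr i).count kk := List.count_pos_iff.2 hktmp
      rw [htc kk] at hkcnt
      refine ⟨?_, ?_, by simp; omega⟩
      · rw [List.pairwise_append]
        refine ⟨h1, by simp, fun a ha b hb => ?_⟩
        rw [List.mem_singleton.1 hb]
        calc a ≤ i.getLast hne := le_getLast_of_pairwise h1 a ha hne
          _ ≤ kk := hlast ▸ hgate'.2
      · rw [List.subperm_ext_iff]
        intro x hx
        rcases List.mem_append.1 hx with hxi | hxk
        · have := List.subperm_ext_iff.1 h2 x hxi
          by_cases hxk : x = kk
          · subst hxk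
            simp [List.count_append]
            omega
          · have hkx : kk ≠ x := fun he => hxk he.symm
            simp [List.count_append, List.count_nil, hkx]
            omega
        · rw [List.mem_singleton] at hxk; subst hxk
          by_cases hxi : x ∈ i
          · have := List.subperm_ext_iff.1 h2 x hxi
            simp [List.count_append]
            omega
          · have hzero : List.count x i = 0 := List.count_eq_zero.2 hxi
            rw [List.count_append]
            have hone : List.count x [x] = 1 := by simp
            rw [hzero, hone]
            omega
    · rintro ⟨h1, h2, h3⟩
      have hne : c ≠ [] := by
        intro he; subst he; simp at h3; omega
      set i := c.dropLast with hi
      set k := c.getLast hne with hk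
      have hck : c = i ++ [k] := (List.dropLast_append_getLast hne).symm
      have hi1 : i.Pairwise (· ≤ ·) := h1.sublist (List.dropLast_sublist c)
      have hi2 : i.Subperm arr := ((List.dropLast_sublist c).subperm).trans h2
      have hi3 : (i.length : Int) = m := by
        rw [hi, List.length_dropLast]; omega
      have hilen : 0 < i.length := by omega
      have hine : i ≠ [] := by
        intro he; rw [he] at hilen; simp at hilen
      have hik : ∀ x ∈ i, x ≤ k := by
        intro x hx
        have := (List.pairwise_append.1 (hck ▸ h1)).2.2
        exact this x hx k (List.mem_singleton_self _)
      obtain ⟨hts, htc⟩ := tmpOf_spec i arr hi2 hs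
      have hkmem : k ∈ tmpOf arr i := by
        rw [← List.count_pos_iff, htc k]
        have := List.subperm_ext_iff.1 h2 k (by rw [hck]; exact List.mem_append_right _ (List.mem_singleton_self _))
        rw [hck, List.count_append] at this
        simp at this
        omega
      refine ⟨i, (combos_mem hs m i).2 ⟨hi1, hi2, hi3⟩, ?_⟩
      rw [hck]
      apply List.mem_map.2
      refine ⟨k, List.mem_filter.2 ⟨hkmem, ?_⟩, rfl⟩
      simp only [decide_eq_true_eq]
      refine ⟨hilen, ?_⟩
      rw [List.getLast?_eq_some_getLast hine, Option.getD_some]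
      exact hik _ (List.getLast_mem hine)
  have hflat : ((combos arr m).flatMap (blk arr)).Pairwise LexLe := by
    apply pairwise_flatMap (S := LexLt) (combos_pairwise hs m)
    · intro i hi
      obtain ⟨h1, h2, h3⟩ := (combos_mem hs m i).1 hi
      obtain ⟨hts, _⟩ := tmpOf_spec i arr h2 hs
      unfold blk
      rw [List.pairwise_map]
      have : ((tmpOf arr i).filter
          (fun k => decide (0 < i.length ∧ i.getLast?.getD 0 ≤ k))).Pairwise (· ≤ ·) :=
        hts.sublist List.filter_sublist
      exact this.imp (fun {k1 k2} hk => by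
        rcases lt_or_eq_of_le hk with hlt | rfl
        · exact Or.inl (lexLt_append_right hlt i)
        · exact Or.inr rfl)
    · intro i1 i2 hS h1 h2 a ha b hb
      obtain ⟨c1, c2, c3⟩ := (combos_mem hs m i1).1 h1
      obtain ⟨d1, d2, d3⟩ := (combos_mem hs m i2).1 h2
      obtain ⟨k1, _, rfl⟩ := List.mem_map.1 ha
      obtain ⟨k2, _, rfl⟩ := List.mem_map.1 hb
      exact Or.inl (lexLt_append hS (by omega) _ _)
  obtain ⟨hpw, hdm⟩ := dd_spec _ none hflat (by simp)
  apply sorted_lex_eq_of_mem_iff _ _ hpw (combos_pairwise hs (m+1))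
  intro c
  rw [hdm c, hmem c, combos_mem hs (m+1) c]
  simp

theorem base_eq {arr : List Int} (hs : arr.Pairwise (· ≤ ·)) :
    solLevel arr 0 = combos arr 1 := by
  have h0 : solLevel arr 0 = dd none (arr.map (fun a => [a])) := by
    show arr.foldl (fun ans i => pushA ans [i]) [] = _
    rw [← List.foldl_map (f := fun a => ([a] : List Int)) (g := pushA), foldl_pushA]
    rfl
  rw [h0]
  have hmap : (arr.map (fun a => [a])).Pairwise LexLe := by
    rw [List.pairwise_map]
    exact hs.imp (fun {a b} hab => by
      rcases lt_or_eq_of_le hab with hlt | rfl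
      · exact Or.inl (List.Lex.rel hlt)
      · exact Or.inr rfl)
  obtain ⟨hpw, hdm⟩ := dd_spec _ none hmap (by simp)
  apply sorted_lex_eq_of_mem_iff _ _ hpw (combos_pairwise hs 1)
  intro c
  rw [hdm c, combos_mem hs 1 c]
  simp only [List.mem_map, ne_eq, reduceCtorEq, not_false_eq_true, and_true]
  constructor
  · rintro ⟨a, ha, rfl⟩
    exact ⟨by simp, by simp [ha], rfl⟩
  · rintro ⟨h1, h2, h3⟩
    rcases c with _ | ⟨a, t⟩
    · simp at h3
    · rcases t with _ | ⟨b, t⟩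
      · exact ⟨a, by simpa using h2, rfl⟩
      · simp at h3; omega

theorem solLevel_eq {arr : List Int} (hs : arr.Pairwise (· ≤ ·)) :
    ∀ n : Nat, solLevel arr n = combos arr ((n : Int) + 1) := by
  intro n
  induction n with
  | zero => simpa using base_eq hs
  | succ n ih =>
    rw [solLevel_succ, ih, step_eq hs (by omega)]
    push_cast
    ring_nf

-- ===== VERDICT (by name: the statement is the Claim_ definition above) =====
theorem solution_spec : Claim_equal_solution := by
  intro N M Arr _ hpre
  unfold Spec_solution solution solution_alt
  have hM : 1 ≤ M := hpre
  rw [if_pos hM]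
  have hs : (PySem.List.sorted Arr (fun x => x) false).Pairwise (· ≤ ·) :=
    PySem.List.sorted_pairwise Arr (fun x => x) 
  rw [solLevel_eq hs]
  congr 1
  omega
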